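-- pv_equiv track=rewrite | github.com/kelvincjr/myRepo | theta-0.24.1/theta/nlp/tasks/task_ner.py | generate_token2chars
-- ===== SOURCE A (Python) =====
-- def generate_token2chars(offset_mapping):
--     token2char = [-1] * (len(offset_mapping) + 1)
--
--     for i, (start, end) in enumerate(offset_mapping):
--         if start == 0 and end == 0:
--             token2char[i] = -1
--             continue
--         token2char[i] = start
--         token2char[i + 1] = end
--
--     return token2char
-- ===== SOURCE B (Python) =====
-- def generate_token2chars(offset_mapping):
--     # Structural recursion: each token contributes its (possibly masked) start;
--     # the base case for the final token also emits the trailing end slot.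
--     def build(toks):
--         s, e = toks[0]
--         if len(toks) == 1:
--             return [-1, -1] if s == 0 and e == 0 else [s, e]
--         return [-1 if s == 0 and e == 0 else s] + build(toks[1:])
--     if not offset_mapping:
--         return [-1]
--     return build(offset_mapping)
-- ===== Notes on version B (the rewrite author's own statement) =====
-- stated objective: alternative
-- what changed: A preallocates a length-n+1 array of -1 and mutates it by index with overlapping writes (every end written to i+1 except the last is overwritten); B is a structural recursion over the token list with no array and no index writes, whose base case for the last token emits both its start slot and the trailing end slot.
import Mathlib
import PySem

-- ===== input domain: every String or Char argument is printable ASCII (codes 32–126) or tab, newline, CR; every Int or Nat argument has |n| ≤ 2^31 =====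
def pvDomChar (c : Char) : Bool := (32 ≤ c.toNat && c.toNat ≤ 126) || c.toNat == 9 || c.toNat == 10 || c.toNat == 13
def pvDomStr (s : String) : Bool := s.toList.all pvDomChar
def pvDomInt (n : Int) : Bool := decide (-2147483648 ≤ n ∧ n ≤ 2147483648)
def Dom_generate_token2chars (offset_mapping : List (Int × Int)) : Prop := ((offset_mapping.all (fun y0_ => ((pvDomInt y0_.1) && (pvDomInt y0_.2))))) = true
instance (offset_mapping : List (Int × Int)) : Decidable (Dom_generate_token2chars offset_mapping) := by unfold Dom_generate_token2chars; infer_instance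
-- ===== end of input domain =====

-- B replaces A's preallocated array with overlapping index writes by a
-- structural recursion over the token list, the last token's base case
-- emitting the trailing end slot (objective: simpler).

-- ===== PORT A =====
-- the loop body of A: state is the mutable list `token2char`, `i` the enumerate index;
-- Python's in-range list assignment t[i] = v is List.set (indices are always in range here)
def tok2charLoop : List (Int × Int) → Nat → List Int → List Int
  | [], _, t => t
  | (s, e) :: rest, i, t =>
      if s = 0 ∧ e = 0 then
        tok2charLoop rest (i + 1) (t.set i (-1))
      else
        tok2charLoop rest (i + 1) ((t.set i s).set (i + 1) e)

def generate_token2chars (offset_mapping : List (Int × Int)) : List Int :=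
  tok2charLoop offset_mapping 0 (List.replicate (offset_mapping.length + 1) (-1))

-- ===== PORT B =====
-- Source B's inner `build`, recursion on the nonempty token list (head carried separately)
def t2cBuild : (Int × Int) → List (Int × Int) → List Int
  | (s, e), [] => if s = 0 ∧ e = 0 then [-1, -1] else [s, e]
  | (s, e), q :: rest => (if s = 0 ∧ e = 0 then (-1 : Int) else s) :: t2cBuild q rest

def generate_token2chars_alt (offset_mapping : List (Int × Int)) : List Int :=
  match offset_mapping with
  | [] => [-1]
  | p :: rest => t2cBuild p rest

-- ===== PRECONDITION & SPEC =====
def Spec_generate_token2chars (offset_mapping : List (Int × Int)) (out : List Int) : Prop := out = generate_token2chars_alt offset_mapping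
instance (offset_mapping : List (Int × Int)) (out : List Int) : Decidable (Spec_generate_token2chars offset_mapping out) := by unfold Spec_generate_token2chars; infer_instance

-- ===== CLAIM (what is proved, stated in full; the proofs are below) =====
def Claim_equal_generate_token2chars : Prop := ∀ (offset_mapping : List (Int × Int)), Dom_generate_token2chars offset_mapping → Spec_generate_token2chars offset_mapping (generate_token2chars offset_mapping)

-- ===== LEMMAS AND PROOFS =====

-- taking i+1 elements of a single in-range write at i keeps the prefix and the written value
theorem take_set_one (t : List Int) (i : Nat) (v : Int) (hi : i < t.length) :
    (t.set i v).take (i + 1) = t.take i ++ [v] := by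
  rw [List.take_set, List.set_eq_take_append_cons_drop,
      if_pos (by simp [List.length_take]; omega)]
  simp [List.take_take]

-- the write at i+1 falls outside the first i+1 elements
theorem take_set_set (t : List Int) (i : Nat) (s e : Int) (hi : i < t.length) :
    ((t.set i s).set (i + 1) e).take (i + 1) = t.take i ++ [s] := by
  rw [List.take_set, List.set_eq_of_length_le (by simp [List.length_take])]
  exact take_set_one t i s hi

-- characterisation of A's loop on a nonempty token list, stated directly against
-- B's recursion: the prefix `< i` of the state is untouched, the written segment
-- is exactly `t2cBuild p om`, and the state beyond position i + length + 1 is untouched.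
theorem tok2charLoop_eq (om : List (Int × Int)) :
    ∀ (p : Int × Int) (i : Nat) (t : List Int),
      i + om.length + 2 ≤ t.length →
      t[i + om.length + 1]? = some (-1) →
      tok2charLoop (p :: om) i t =
        t.take i ++ t2cBuild p om ++ t.drop (i + om.length + 2) := by
  induction om with
  | nil =>
      intro p i t hlen hget
      obtain ⟨s, e⟩ := p
      simp only [List.length_nil] at hlen hget
      have hi : i < t.length := by omega
      have hi1 : i + 1 < t.length := by omega
      have hval : t[i + 1] = -1 := by
        rw [List.getElem?_eq_getElem hi1] at hget
        exact Option.some_inj.mp hget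
      show (if s = 0 ∧ e = 0 then tok2charLoop [] (i + 1) (t.set i (-1))
            else tok2charLoop [] (i + 1) ((t.set i s).set (i + 1) e)) = _
      by_cases h : s = 0 ∧ e = 0
      · rw [if_pos h]
        show t.set i (-1) = _
        rw [List.set_eq_take_append_cons_drop, if_pos hi,
            List.drop_eq_getElem_cons hi1, hval]
        simp [t2cBuild, h]
      · rw [if_neg h]
        show (t.set i s).set (i + 1) e = _
        rw [List.set_eq_take_append_cons_drop,
            if_pos (show i + 1 < (t.set i s).length by simp; omega),
            take_set_one t i s hi,
            show i + 1 + 1 = i + 2 from rfl,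
            List.drop_set_of_lt (by omega)]
        simp [t2cBuild, h]
  | cons q rest ih =>
      intro p i t hlen hget
      obtain ⟨s, e⟩ := p
      simp only [List.length_cons] at hlen hget
      have hi : i < t.length := by omega
      have e1 : i + 1 + rest.length + 2 = i + (rest.length + 1) + 2 := by omega
      have e2 : i + 1 + rest.length + 1 = i + (rest.length + 1) + 1 := by omega
      show (if s = 0 ∧ e = 0 then tok2charLoop (q :: rest) (i + 1) (t.set i (-1))
            else tok2charLoop (q :: rest) (i + 1) ((t.set i s).set (i + 1) e)) = _
      by_cases h : s = 0 ∧ e = 0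
      · rw [if_pos h,
            ih q (i + 1) (t.set i (-1))
              (by simp only [List.length_set]; omega)
              (by rw [List.getElem?_set_ne (by omega), e2]; exact hget),
            take_set_one t i (-1) hi, e1,
            List.drop_set_of_lt (by omega)]
        simp [t2cBuild, h]
      · rw [if_neg h,
            ih q (i + 1) ((t.set i s).set (i + 1) e)
              (by simp only [List.length_set]; omega)
              (by rw [List.getElem?_set_ne (by omega), List.getElem?_set_ne (by omega), e2]
                  exact hget),
            take_set_set t i s e hi, e1,
            List.drop_set_of_lt (by omega), List.drop_set_of_lt (by omega)]
        simp [t2cBuild, h]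

-- ===== VERDICT (by name: the statement is the Claim_ definition above) =====
theorem generate_token2chars_spec : Claim_equal_generate_token2chars := by
  intro om _
  unfold Spec_generate_token2chars generate_token2chars generate_token2chars_alt
  match om with
  | [] => simp [tok2charLoop]
  | p :: rest =>
      rw [tok2charLoop_eq rest p 0 (List.replicate ((p :: rest).length + 1) (-1))
            (by simp) (by rw [List.getElem?_replicate]; simp)]
      simp [List.drop_replicate]
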